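-- pv_equiv track=rewrite | github.com/mmalvino/OS_assignment2_disk-scheduling | main.py | optimized_c_scan
-- ===== SOURCE A (Python) =====
-- def optimized_c_scan(requests, initial_position):
--     # Split requests based on the initial position
--     left = [r for r in requests if r < initial_position]
--     right = [r for r in requests if r >= initial_position]
--     movements = 0
--
--     # Service right requests if available
--     if right:
--         movements += calculate_head_movements(right, initial_position)
--         # Jump to the closest request in the opposite direction
--         if left:
--             optimal_jump = min(left, key=lambda x: abs(4999 - x))
--             movements += abs(right[-1] - optimal_jump)
--             movements += calculate_head_movements(left, optimal_jump)
--     else: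
--         # Service left requests if no right requests
--         optimal_jump = min(left, key=lambda x: abs(4999 - x))
--         movements += abs(initial_position - optimal_jump)
--         movements += calculate_head_movements(left, optimal_jump)
--
--     return movements
--
-- def calculate_head_movements(requests, initial_position):
--     movements = 0
--     current_position = initial_position
--     for request in requests:
--         movements += abs(request - current_position)
--         current_position = request
--     return movements
-- ===== SOURCE B (Python) =====
-- def optimized_c_scan(requests, initial_position):
--     # Single streaming pass with O(1) state: no left/right lists are ever built.
--     # Tracks, for the >=initial_position subsequence, the running movement and last
--     # position; for the <initial_position subsequence, its first element, previous
--     # element, internal movement, and the element closest to 4999 (first on ties,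
--     # mirroring min's left-to-right scan). Totals are combined at the end.
--     sum_r = 0
--     cur_r = initial_position
--     last_r = None
--     sum_l = 0
--     first_l = None
--     prev_l = None
--     best = None
--     for r in requests:
--         if r >= initial_position:
--             sum_r += abs(r - cur_r)
--             cur_r = r
--             last_r = r
--         else:
--             if first_l is None:
--                 first_l = r
--             else:
--                 sum_l += abs(r - prev_l)
--             prev_l = r
--             if best is None or abs(4999 - r) < abs(4999 - best):
--                 best = r
--     if last_r is not None:
--         total = sum_r
--         if first_l is not None:
--             total += abs(last_r - best) + abs(first_l - best) + sum_l
--         return total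
--     return abs(initial_position - best) + abs(first_l - best) + sum_l
-- ===== Notes on version B (the rewrite author's own statement) =====
-- stated objective: alternative
-- what changed: B replaces A's two filter passes, materialized left/right lists and accumulator helper by a single streaming pass over requests that keeps only O(1) scalar state (running movement, last right position, first/previous left element, internal left movement, and the closest-to-4999 element), combining the totals at the end without ever building the sublists.
-- outside the precondition, e.g. on optimized_c_scan([], 100): A raises ValueError, B raises TypeError
import Mathlib
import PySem

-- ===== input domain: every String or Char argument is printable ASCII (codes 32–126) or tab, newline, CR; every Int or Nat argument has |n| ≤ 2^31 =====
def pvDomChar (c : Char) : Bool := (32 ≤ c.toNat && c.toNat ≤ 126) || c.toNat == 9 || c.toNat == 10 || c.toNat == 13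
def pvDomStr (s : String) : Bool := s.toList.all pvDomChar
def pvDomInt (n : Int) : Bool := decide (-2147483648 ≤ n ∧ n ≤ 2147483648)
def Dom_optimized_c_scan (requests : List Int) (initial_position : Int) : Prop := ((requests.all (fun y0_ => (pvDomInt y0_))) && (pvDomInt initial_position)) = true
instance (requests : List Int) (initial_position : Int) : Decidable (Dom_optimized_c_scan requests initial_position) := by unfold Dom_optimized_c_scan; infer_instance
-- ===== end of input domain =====

-- B is a single streaming pass keeping only O(1) scalar state (no left/right lists built);
-- objective: alternative algorithm/data layout, same O(n) time.

-- ===== PORT A =====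
-- calculate_head_movements: loop keeping (movements, current_position)
def pvCalcHead (requests : List Int) (initial_position : Int) : Int :=
  (requests.foldl (fun (s : Int × Int) r => (s.1 + |r - s.2|, r)) (0, initial_position)).1

def optimized_c_scan (requests : List Int) (initial_position : Int) : Int :=
  let left := requests.filter (fun r => decide (r < initial_position))
  let right := requests.filter (fun r => decide (initial_position ≤ r))
  if right ≠ [] then
    if left ≠ [] then
      -- min(left, key=…) is total here under Pre_ (left ≠ []); the getD 0 default is never taken
      let oj := (PySem.List.min? left (fun x => |4999 - x|)).getD 0
      pvCalcHead right initial_position + |right.getLast?.getD 0 - oj| + pvCalcHead left oj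
    else
      pvCalcHead right initial_position
  else
    let oj := (PySem.List.min? left (fun x => |4999 - x|)).getD 0
    |initial_position - oj| + pvCalcHead left oj

-- ===== PORT B =====
-- scalar loop state of Source B: sum_r, cur_r, last_r, sum_l, and the left-side trio
-- (first_l, prev_l, best) which are all None/set together
structure PvSt where
  sumR : Int
  curR : Int
  lastR : Option Int
  sumL : Int
  left : Option (Int × Int × Int)  -- (first_l, prev_l, best)
deriving Repr

def pvStep (ip : Int) (st : PvSt) (r : Int) : PvSt :=
  if ip ≤ r then
    { st with sumR := st.sumR + |r - st.curR|, curR := r, lastR := some r }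
  else
    match st.left with
    | none => { st with left := some (r, r, r) }
    | some (f, p, b) =>
        { st with sumL := st.sumL + |r - p|,
                  left := some (f, r, if |4999 - r| < |4999 - b| then r else b) }

def optimized_c_scan_alt (requests : List Int) (initial_position : Int) : Int :=
  let st := requests.foldl (pvStep initial_position) ⟨0, initial_position, none, 0, none⟩
  match st.lastR, st.left with
  | some lr, some (f, _, b) => st.sumR + |lr - b| + |f - b| + st.sumL
  | some _, none => st.sumR
  | none, some (f, _, b) => |initial_position - b| + |f - b| + st.sumL
  | none, none => 0  -- unreachable under Pre_ (requests ≠ []); Python raises here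

-- ===== PRECONDITION & SPEC =====
-- Pre_ excludes only requests = [], where Python A raises ValueError (min of an empty list)
-- and Python B raises TypeError.
def Pre_optimized_c_scan (requests : List Int) (initial_position : Int) : Prop :=
  requests ≠ []
instance (requests : List Int) (initial_position : Int) : Decidable (Pre_optimized_c_scan requests initial_position) := by unfold Pre_optimized_c_scan; infer_instance

def pvWitness_optimized_c_scan : List Int × Int := ([10, 3, 25], 7)

def Spec_optimized_c_scan (requests : List Int) (initial_position : Int) (out : Int) : Prop := out = optimized_c_scan_alt requests initial_position
instance (requests : List Int) (initial_position : Int) (out : Int) : Decidable (Spec_optimized_c_scan requests initial_position out) := by unfold Spec_optimized_c_scan; infer_instance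

-- ===== CLAIM (what is proved, stated in full; the proofs are below) =====
def Claim_equal_optimized_c_scan : Prop := ∀ (requests : List Int) (initial_position : Int), Dom_optimized_c_scan requests initial_position → Pre_optimized_c_scan requests initial_position → Spec_optimized_c_scan requests initial_position (optimized_c_scan requests initial_position)

-- ===== LEMMAS AND PROOFS =====

/-- Movement total starting at `c` through the list in order. -/
def pvSumFrom (c : Int) : List Int → Int
  | [] => 0
  | r :: rs => |r - c| + pvSumFrom r rs

/-- Internal movement of a list (movement from its first element onwards). -/
def pvTail : List Int → Int
  | [] => 0
  | x :: xs => pvSumFrom x xs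

/-- The keep-first running minimum by |4999 - ·|, seeded with the first element. -/
def pvBestFold (x : Int) (xs : List Int) : Int :=
  xs.foldl (fun m r => if |4999 - r| < |4999 - m| then r else m) x

/-- Closed form of Source B's loop state after processing `l`. -/
def pvBState (ip : Int) (l : List Int) : PvSt :=
  let R := l.filter (fun r => decide (ip ≤ r))
  let L := l.filter (fun r => decide (r < ip))
  { sumR := pvSumFrom ip R
    curR := R.getLastD ip
    lastR := R.getLast?
    sumL := pvTail L
    left := match L with
            | [] => none
            | x :: xs => some (x, (x :: xs).getLastD 0, pvBestFold x xs) }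

theorem pvCalcHead_foldl (l : List Int) (acc c : Int) :
    (l.foldl (fun (s : Int × Int) r => (s.1 + |r - s.2|, r)) (acc, c)).1
      = acc + pvSumFrom c l := by
  induction l generalizing acc c with
  | nil => simp [pvSumFrom]
  | cons r rs ih => simp [List.foldl, pvSumFrom, ih]; ring

theorem pvCalcHead_eq (l : List Int) (c : Int) : pvCalcHead l c = pvSumFrom c l := by
  simpa using pvCalcHead_foldl l 0 c

theorem pvSumFrom_append (l1 l2 : List Int) (c : Int) :
    pvSumFrom c (l1 ++ l2) = pvSumFrom c l1 + pvSumFrom (l1.getLastD c) l2 := by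
  induction l1 generalizing c with
  | nil => simp [pvSumFrom]
  | cons r rs ih =>
    rw [List.cons_append]
    show |r - c| + pvSumFrom r (rs ++ l2) = |r - c| + pvSumFrom r rs + _
    rw [ih, List.getLastD_cons]
    ring

/-- One scan step of Python's min with a key. -/
theorem pvMin?_step (x y : Int) (t : List Int) :
    PySem.List.min? (x :: y :: t) (fun z => |4999 - z|)
      = PySem.List.min? ((if |4999 - y| < |4999 - x| then y else x) :: t) (fun z => |4999 - z|) := by
  simp only [PySem.List.min?, List.foldl]
  split <;> rfl

theorem pvMin?_cons (x : Int) (xs : List Int) :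
    PySem.List.min? (x :: xs) (fun y => |4999 - y|) = some (pvBestFold x xs) := by
  induction xs generalizing x with
  | nil => rfl
  | cons y t ih =>
    rw [pvMin?_step, ih]
    simp only [pvBestFold, List.foldl]

theorem pvGetD_cons (x : Int) (xs : List Int) (d : Int) :
    (x :: xs).getLast?.getD d = xs.getLast?.getD x := by
  induction xs generalizing x d with
  | nil => rfl
  | cons a t iha =>
    simp only [List.getLast?_cons_cons]
    exact (iha a d).trans (iha a x).symm

theorem pvGetD_concat (x r : Int) (xs : List Int) :
    (x :: (xs ++ [r])).getLast?.getD (0 : Int) = r := by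
  rw [← List.cons_append, List.getLast?_concat]; rfl

/-- Source B's fold equals the closed-form state. -/
theorem pvB_inv (ip : Int) (l : List Int) :
    l.foldl (pvStep ip) ⟨0, ip, none, 0, none⟩ = pvBState ip l := by
  induction l using List.reverseRecOn with
  | nil => simp [pvBState, pvSumFrom, pvTail]
  | append_singleton l r ih =>
    rw [List.foldl_append, ih]
    simp only [List.foldl]
    unfold pvBState pvStep
    by_cases h : ip ≤ r
    · have h2 : ¬ (r < ip) := not_lt.mpr h
      simp [List.filter_append, h, h2, pvSumFrom_append, pvSumFrom,
        List.getLastD_eq_getLast?]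
    · have h2 : r < ip := not_le.mp h
      simp only [List.filter_append, List.filter_cons, List.filter_nil, h, h2, decide_true,
        decide_false, if_true, if_false, Bool.false_eq_true, List.append_nil]
      cases hL : l.filter (fun r => decide (r < ip)) with
      | nil => simp [pvTail, pvSumFrom, pvBestFold]
      | cons x xs =>
        simp [pvTail, pvSumFrom_append, pvSumFrom, pvBestFold, List.foldl_append,
          List.getLastD_eq_getLast?, pvGetD_cons, pvGetD_concat]

-- ===== VERDICT (by name: the statement is the Claim_ definition above) =====
theorem optimized_c_scan_spec : Claim_equal_optimized_c_scan := by
  intro requests ip _ hpre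
  unfold Spec_optimized_c_scan optimized_c_scan optimized_c_scan_alt
  rw [pvB_inv]
  unfold pvBState
  simp only []
  generalize hL : List.filter (fun r => decide (r < ip)) requests = L
  generalize hR : List.filter (fun r => decide (ip ≤ r)) requests = R
  cases R with
  | nil =>
    cases L with
    | nil =>
      exfalso
      rcases requests with _ | ⟨a, t⟩
      · exact hpre rfl
      · by_cases h : ip ≤ a
        · have : a ∈ List.filter (fun r => decide (ip ≤ r)) (a :: t) :=
            List.mem_filter.mpr ⟨List.mem_cons_self, by simp [h]⟩
          rw [hR] at this; simp at this
        · have : a ∈ List.filter (fun r => decide (r < ip)) (a :: t) :=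
            List.mem_filter.mpr ⟨List.mem_cons_self, by simp [not_le.mp h]⟩
          rw [hL] at this; simp at this
    | cons x xs =>
      rw [pvMin?_cons]
      simp [pvCalcHead_eq, pvSumFrom, pvTail, abs_sub_comm]
      ring
  | cons r0 rs =>
    have hlr : (r0 :: rs).getLast? = some ((r0 :: rs).getLast (List.cons_ne_nil r0 rs)) :=
      List.getLast?_eq_some_getLast (List.cons_ne_nil r0 rs)
    cases L with
    | nil =>
      simp [hlr, pvCalcHead_eq, pvSumFrom]
    | cons x xs =>
      rw [pvMin?_cons]
      simp [hlr, pvCalcHead_eq, pvSumFrom, pvTail, abs_sub_comm,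
        List.getLastD_eq_getLast?]
      ring
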